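-- pv_equiv track=rewrite | github.com/OMR-Research/mung | mung/utils.py | connected_components2bboxes
-- ===== SOURCE A (Python) =====
-- def connected_components2bboxes(labels):
--     """Returns a dictionary of bounding boxes (upper left c., lower right c.)
--     for each label.
--
--     >>> labels = [[0, 0, 1, 1], [2, 0, 0, 1], [2, 0, 0, 0], [0, 0, 3, 3]]
--     >>> bboxes = connected_components2bboxes(labels)
--     >>> bboxes[0]
--     [0, 0, 4, 4]
--     >>> bboxes[1]
--     [0, 2, 2, 4]
--     >>> bboxes[2]
--     [1, 0, 3, 1]
--     >>> bboxes[3]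
--     [3, 2, 4, 4]
--
--
--     :param labels: The output of cv2.connectedComponents().
--
--     :returns: A dict indexed by labels. The values are quadruplets
--         (xmin, ymin, xmax, ymax) so that the component with the given label
--         lies exactly within labels[xmin:xmax, ymin:ymax].
--     """
--     bboxes = {}
--     for x, row in enumerate(labels):
--         for y, l in enumerate(row):
--             if l not in bboxes:
--                 bboxes[l] = [x, y, x+1, y+1]
--             else:
--                 box = bboxes[l]
--                 if x < box[0]:
--                     box[0] = x
--                 elif x + 1 > box[2]:
--                     box[2] = x + 1
--                 if y < box[1]:
--                     box[1] = y
--                 elif y + 1 > box[3]: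
--                     box[3] = y + 1
--     return bboxes
-- ===== SOURCE B (Python) =====
-- def connected_components2bboxes(labels):
--     # Group coordinates per label in one pass, then reduce each group to its bbox.
--     coords = {}
--     for x, row in enumerate(labels):
--         for y, l in enumerate(row):
--             coords.setdefault(l, []).append((x, y))
--     bboxes = {}
--     for l, pts in coords.items():
--         xs = [p[0] for p in pts]
--         ys = [p[1] for p in pts]
--         bboxes[l] = [min(xs), min(ys), max(xs) + 1, max(ys) + 1]
--     return bboxes
-- ===== Notes on version B (the rewrite author's own statement) =====
-- stated objective: alternative
-- what changed: B replaces A's running init-or-update extrema dict with a two-phase shape: one pass grouping each label's (x,y) coordinates into a dict, then a second pass reducing each group to [min xs, min ys, max xs + 1, max ys + 1].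
import Mathlib
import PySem

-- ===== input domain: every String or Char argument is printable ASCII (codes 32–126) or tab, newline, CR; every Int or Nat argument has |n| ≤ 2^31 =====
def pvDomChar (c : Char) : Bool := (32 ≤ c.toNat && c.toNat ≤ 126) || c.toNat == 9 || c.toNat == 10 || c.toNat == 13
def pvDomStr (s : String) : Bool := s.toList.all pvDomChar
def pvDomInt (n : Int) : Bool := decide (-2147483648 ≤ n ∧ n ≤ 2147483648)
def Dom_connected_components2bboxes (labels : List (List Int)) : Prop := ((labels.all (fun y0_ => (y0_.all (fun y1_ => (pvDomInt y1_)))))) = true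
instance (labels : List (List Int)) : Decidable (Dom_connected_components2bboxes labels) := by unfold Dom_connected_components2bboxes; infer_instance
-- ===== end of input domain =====

-- B groups coordinates per label first and reduces each group to its bbox afterwards,
-- instead of A's running init-or-update extrema; same cost, different decomposition.

-- ===== PORT A =====
-- A's per-cell update: box always has exactly 4 elements, so the index reads
-- (pyGet? …).getD 0 and writes List.set at 0..3 are exact (never out of range).
def pvAStep (bboxes : PySem.Dict Int (List Int)) (x y l : Int) : PySem.Dict Int (List Int) :=
  if bboxes.contains l = false then
    bboxes.insert l [x, y, x + 1, y + 1]
  else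
    let box := bboxes.getD l []
    let box := if x < (PySem.List.pyGet? box 0).getD 0 then box.set 0 x
               else if x + 1 > (PySem.List.pyGet? box 2).getD 0 then box.set 2 (x + 1) else box
    let box := if y < (PySem.List.pyGet? box 1).getD 0 then box.set 1 y
               else if y + 1 > (PySem.List.pyGet? box 3).getD 0 then box.set 3 (y + 1) else box
    bboxes.insert l box   -- Python mutates the stored list in place; overwrite keeps position

def connected_components2bboxes (labels : List (List Int)) : List (Int × List Int) :=
  ((PySem.List.enumerate labels).foldl (fun d p =>
    (PySem.List.enumerate p.2).foldl (fun d q => pvAStep d p.1 q.1 q.2) d)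
    PySem.Dict.empty).items

-- ===== PORT B =====
-- min(xs)/max(xs): pts is nonempty wherever this is called, so the `.getD 0`
-- defaults (Python's ValueError case) are never used.
def pvBboxOf (pts : List (Int × Int)) : List Int :=
  let xs := pts.map (fun p => p.1)
  let ys := pts.map (fun p => p.2)
  [((PySem.List.min? xs (fun v => v)).getD 0),
   ((PySem.List.min? ys (fun v => v)).getD 0),
   ((PySem.List.max? xs (fun v => v)).getD 0) + 1,
   ((PySem.List.max? ys (fun v => v)).getD 0) + 1]

def connected_components2bboxes_alt (labels : List (List Int)) : List (Int × List Int) :=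
  let coords := (PySem.List.enumerate labels).foldl (fun d p =>
    (PySem.List.enumerate p.2).foldl
      (fun d q => d.modify q.2 [] (fun pts => pts ++ [(p.1, q.1)])) d)
    PySem.Dict.empty
  (coords.items.foldl (fun (bb : PySem.Dict Int (List Int)) pr => bb.insert pr.1 (pvBboxOf pr.2))
    PySem.Dict.empty).items

-- ===== PRECONDITION & SPEC =====
def Spec_connected_components2bboxes (labels : List (List Int)) (out : List (Int × List Int)) : Prop := out = connected_components2bboxes_alt labels
instance (labels : List (List Int)) (out : List (Int × List Int)) : Decidable (Spec_connected_components2bboxes labels out) := by unfold Spec_connected_components2bboxes; infer_instance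

-- ===== CLAIM (what is proved, stated in full; the proofs are below) =====
def Claim_equal_connected_components2bboxes : Prop := ∀ (labels : List (List Int)), Dom_connected_components2bboxes labels → Spec_connected_components2bboxes labels (connected_components2bboxes labels)

-- ===== LEMMAS AND PROOFS =====

-- the per-label coordinate-grouping step of B
def pvBStep (d : PySem.Dict Int (List (Int × Int))) (x y l : Int) : PySem.Dict Int (List (Int × Int)) :=
  d.modify l [] (fun pts => pts ++ [(x, y)])

-- invariant relating A's bbox dict to B's coordinate-group dict
def pvRel (dA : PySem.Dict Int (List Int)) (dB : PySem.Dict Int (List (Int × Int))) : Prop :=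
  dB.keys.Nodup ∧ (∀ p ∈ dB.items, p.2 ≠ []) ∧
    dA.items = dB.items.map (fun p => (p.1, pvBboxOf p.2))

lemma pvMin_le_max (xs : List Int) (h : xs ≠ []) :
    (PySem.List.min? xs (fun v => v)).getD 0 ≤ (PySem.List.max? xs (fun v => v)).getD 0 := by
  obtain ⟨m, hm⟩ : ∃ m, PySem.List.min? xs (fun v => v) = some m := by
    cases hmm : PySem.List.min? xs (fun v => v) with
    | none => exact absurd ((PySem.List.min?_eq_none_iff _ _).mp hmm) h
    | some m => exact ⟨m, rfl⟩
  obtain ⟨M, hM⟩ : ∃ M, PySem.List.max? xs (fun v => v) = some M := by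
    cases hmm : PySem.List.max? xs (fun v => v) with
    | none => exact absurd ((PySem.List.max?_eq_none_iff _ _).mp hmm) h
    | some M => exact ⟨M, rfl⟩
  simpa [hm, hM] using PySem.List.max?_isMax hM m (PySem.List.min?_mem hm)

lemma pvBboxOf_append (pts : List (Int × Int)) (h : pts ≠ []) (x y : Int) :
    pvBboxOf (pts ++ [(x, y)]) =
      [min ((PySem.List.min? (pts.map (fun p => p.1)) (fun v => v)).getD 0) x,
       min ((PySem.List.min? (pts.map (fun p => p.2)) (fun v => v)).getD 0) y,
       max ((PySem.List.max? (pts.map (fun p => p.1)) (fun v => v)).getD 0 + 1) (x + 1),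
       max ((PySem.List.max? (pts.map (fun p => p.2)) (fun v => v)).getD 0 + 1) (y + 1)] := by
  obtain ⟨p, rest, rfl⟩ : ∃ p rest, pts = p :: rest := by
    cases pts with
    | nil => exact absurd rfl h
    | cons p rest => exact ⟨p, rest, rfl⟩
  simp [pvBboxOf, PySem.List.min?_id_cons, PySem.List.max?_id_cons, List.foldl_append]

lemma pvChain (m0 m1 M0 M1 x y : Int) (hx : m0 ≤ M0) (hy : m1 ≤ M1) :
    (let box := [m0, m1, M0 + 1, M1 + 1]
     let box := if x < (PySem.List.pyGet? box 0).getD 0 then box.set 0 x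
                else if x + 1 > (PySem.List.pyGet? box 2).getD 0 then box.set 2 (x + 1) else box
     let box := if y < (PySem.List.pyGet? box 1).getD 0 then box.set 1 y
                else if y + 1 > (PySem.List.pyGet? box 3).getD 0 then box.set 3 (y + 1) else box
     box) = [min m0 x, min m1 y, max (M0 + 1) (x + 1), max (M1 + 1) (y + 1)] := by
  simp only [PySem.List.pyGet?, PySem.List.pyIdx?]
  norm_num
  split_ifs <;> simp_all <;> omega

lemma pvStep (dA : PySem.Dict Int (List Int)) (dB : PySem.Dict Int (List (Int × Int)))
    (x y l : Int) (h : pvRel dA dB) : pvRel (pvAStep dA x y l) (pvBStep dB x y l) := by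
  obtain ⟨hnd, hne, hitems⟩ := h
  have hkeys : dA.keys = dB.keys := by
    simp only [PySem.Dict.keys, hitems, List.map_map]; rfl
  have hcont : dA.contains l = dB.contains l := by
    rw [PySem.Dict.contains_eq_decide_mem_keys, PySem.Dict.contains_eq_decide_mem_keys, hkeys]
  by_cases hc : dB.contains l = true
  · -- label already present
    have hAc : dA.contains l = true := hcont.trans hc
    -- the group stored at l
    obtain ⟨pts, hget⟩ : ∃ pts, dB.get? l = some pts := by
      have := PySem.Dict.contains_eq_isSome_get? (d := dB) (k := l)
      rw [hc] at this
      cases hgg : dB.get? l with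
      | none => rw [hgg] at this; simp at this
      | some v => exact ⟨v, rfl⟩
    have hmemB : (l, pts) ∈ dB.items := PySem.Dict.mem_items_of_get?_eq_some dB hget
    have hgetD : dB.getD l [] = pts := PySem.Dict.getD_of_get?_eq_some dB [] hget
    have hptsne : pts ≠ [] := hne _ hmemB
    have hAnd : dA.keys.Nodup := hkeys ▸ hnd
    have hmemA : (l, pvBboxOf pts) ∈ dA.items := by
      rw [hitems]; exact List.mem_map_of_mem hmemB
    have hAgetD : dA.getD l [] = pvBboxOf pts := PySem.Dict.getD_of_mem_items dA hmemA hAnd []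
    have hxle := pvMin_le_max (pts.map (fun p => p.1)) (by simpa using hptsne)
    have hyle := pvMin_le_max (pts.map (fun p => p.2)) (by simpa using hptsne)
    -- A's update of the stored bbox equals the bbox of the extended group
    have hstep : pvAStep dA x y l = dA.insert l (pvBboxOf (pts ++ [(x, y)])) := by
      unfold pvAStep
      simp only [hAc, Bool.true_eq_false, if_false]
      congr 1
      rw [hAgetD, pvBboxOf_append pts hptsne x y]
      simp only [pvBboxOf]
      exact pvChain _ _ _ _ x y hxle hyle
    refine ⟨?_, ?_, ?_⟩
    · simpa [pvBStep, PySem.Dict.modify, PySem.Dict.keys_insert_of_contains _ _ hc] using hnd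
    · intro p hp
      simp only [pvBStep, PySem.Dict.modify,
        PySem.Dict.items_insert_of_contains _ _ hc, List.mem_map] at hp
      obtain ⟨q, hq, rfl⟩ := hp
      by_cases hql : (q.1 == l) = true <;> simp [hql]
      exact hne _ hq
    · rw [hstep]
      simp only [pvBStep, PySem.Dict.modify, hgetD,
        PySem.Dict.items_insert_of_contains _ _ hc,
        PySem.Dict.items_insert_of_contains _ _ hAc, hitems, List.map_map]
      refine List.map_congr_left (fun q hq => ?_)
      by_cases hql : (q.1 == l) = true <;> simp [hql, Function.comp]
  · -- fresh label
    have hcB : dB.contains l = false := by simpa using hc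
    have hcA : dA.contains l = false := by rw [hcont]; exact hcB
    have hlk : l ∉ dB.keys := by
      have := PySem.Dict.contains_eq_decide_mem_keys (d := dB) (k := l)
      rw [hcB] at this; simpa using this.symm
    have hBgetD : dB.getD l [] = [] := PySem.Dict.getD_of_not_contains dB [] hcB
    refine ⟨?_, ?_, ?_⟩
    · have hk : (pvBStep dB x y l).keys = dB.keys ++ [l] := by
        simp [pvBStep, PySem.Dict.modify, PySem.Dict.keys_insert_of_not_contains _ _ hcB]
      rw [hk]
      simp [List.nodup_append, hnd]
      exact fun a ha hal => hlk (hal ▸ ha)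
    · intro p hp
      simp only [pvBStep, PySem.Dict.modify,
        PySem.Dict.items_insert_of_not_contains _ _ hcB, List.mem_append, List.mem_singleton] at hp
      rcases hp with hp | hp
      · exact hne _ hp
      · subst hp; simp [hBgetD]
    · simp [pvAStep, hcA, pvBStep, PySem.Dict.modify, hBgetD,
        PySem.Dict.items_insert_of_not_contains _ _ hcB,
        PySem.Dict.items_insert_of_not_contains _ _ hcA, hitems, pvBboxOf,
        PySem.List.min?_id_cons, PySem.List.max?_id_cons]

lemma pvFold (cs : List (Int × Int × Int)) (dA : PySem.Dict Int (List Int))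
    (dB : PySem.Dict Int (List (Int × Int))) (h : pvRel dA dB) :
    pvRel (cs.foldl (fun d c => pvAStep d c.1 c.2.1 c.2.2) dA)
          (cs.foldl (fun d c => pvBStep d c.1 c.2.1 c.2.2) dB) := by
  induction cs generalizing dA dB with
  | nil => exact h
  | cons c cs ih => exact ih _ _ (pvStep dA dB c.1 c.2.1 c.2.2 h)

-- the row-major cell stream both loops traverse
def pvCells (labels : List (List Int)) : List (Int × Int × Int) :=
  (PySem.List.enumerate labels).flatMap
    (fun p => (PySem.List.enumerate p.2).map (fun q => (p.1, q.1, q.2)))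

lemma pvRel_main (labels : List (List Int)) :
    pvRel ((pvCells labels).foldl (fun d c => pvAStep d c.1 c.2.1 c.2.2) PySem.Dict.empty)
          ((pvCells labels).foldl (fun d c => pvBStep d c.1 c.2.1 c.2.2) PySem.Dict.empty) := by
  exact pvFold _ _ _ ⟨by simp [PySem.Dict.keys_empty], by simp [PySem.Dict.empty], by simp [PySem.Dict.empty]⟩

-- ===== VERDICT (by name: the statement is the Claim_ definition above) =====
theorem connected_components2bboxes_spec : Claim_equal_connected_components2bboxes := by
  intro labels _
  show connected_components2bboxes labels = connected_components2bboxes_alt labels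
  obtain ⟨hnd, hne, hitems⟩ := pvRel_main labels
  have hA : connected_components2bboxes labels =
      ((pvCells labels).foldl (fun d c => pvAStep d c.1 c.2.1 c.2.2) PySem.Dict.empty).items := by
    simp only [connected_components2bboxes, pvCells, List.foldl_flatMap, List.foldl_map]
  set coords := (pvCells labels).foldl (fun d c => pvBStep d c.1 c.2.1 c.2.2) PySem.Dict.empty
    with hcoords
  have hB : connected_components2bboxes_alt labels =
      (coords.items.foldl
        (fun (bb : PySem.Dict Int (List Int)) pr => bb.insert pr.1 (pvBboxOf pr.2))
        PySem.Dict.empty).items := by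
    simp only [connected_components2bboxes_alt, hcoords, pvCells, pvBStep,
      List.foldl_flatMap, List.foldl_map]
  rw [hA, hB,
    PySem.Dict.items_foldl_insert_fresh coords.items (fun pr => pr.1) (fun pr => pvBboxOf pr.2)
      PySem.Dict.empty (fun a _ => PySem.Dict.contains_empty _) hnd]
  simpa using hitems
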